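-- pv_equiv track=rewrite | github.com/LanHikari22/delta-lab | foobar/find-the-access-codes/solution_alt.py | _filterDuplicatesInSeq
-- ===== SOURCE A (Python) =====
-- def _filterDuplicatesInSeq(l, n):
--     """
--     Removes any duplicate contiguous elements exteeding `n` in O(m) where m = len(l)
--     ex: [a,a,a,a,X,b,b,b] -> [a,a,a,X,b,b,b] for n=3
--     """
--     seq_state, VAL, CNT = (None, 0), 0, 1
--     res = []
--     m = len(l)
--     for i in range(m):
--         if seq_state[VAL] != l[i]:
--             seq_state = (l[i], 0)
--         if seq_state[CNT] < n:
--             res.append(l[i])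
--         seq_state = (seq_state[VAL], seq_state[CNT] + 1)
--     return res
-- ===== SOURCE B (Python) =====
-- def _filterDuplicatesInSeq(l, n):
--     """Cap each maximal run of equal contiguous elements at n copies:
--     find each run with two indices, then emit min(run length, n) copies."""
--     res = []
--     i = 0
--     m = len(l)
--     while i < m:
--         j = i
--         while j < m and l[j] == l[i]:
--             j += 1
--         res.extend([l[i]] * min(j - i, n))
--         i = j
--     return res
-- ===== Notes on version B (the rewrite author's own statement) =====
-- stated objective: idiomatic
-- what changed: B splits the list into maximal runs of equal values with a two-index scan and emits min(run length, n) copies per run, instead of A's element-by-element (value, count) state machine.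
import Mathlib
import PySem

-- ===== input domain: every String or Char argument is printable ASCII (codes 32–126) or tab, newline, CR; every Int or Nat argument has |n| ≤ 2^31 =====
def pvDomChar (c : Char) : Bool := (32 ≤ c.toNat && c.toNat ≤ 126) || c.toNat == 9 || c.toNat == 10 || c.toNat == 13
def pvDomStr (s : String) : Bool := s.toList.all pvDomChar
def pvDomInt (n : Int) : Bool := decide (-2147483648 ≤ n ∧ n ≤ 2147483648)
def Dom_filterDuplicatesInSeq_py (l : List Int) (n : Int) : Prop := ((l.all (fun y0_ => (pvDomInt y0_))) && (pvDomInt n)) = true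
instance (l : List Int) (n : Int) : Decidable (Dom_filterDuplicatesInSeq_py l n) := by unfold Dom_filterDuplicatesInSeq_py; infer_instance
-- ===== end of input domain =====

-- B re-decomposes A's (value,count) state machine into a runs-then-emit two-index scan (idiomatic; same cost).

-- ===== PORT A =====
-- A's for-loop over indices, threading seq_state = (value : Option Int, count : Int); emits as it goes.
def pvAGo (l : List Int) (v : Option Int) (c : Int) (n : Int) : List Int :=
  match l with
  | [] => []
  | x :: xs =>
    let st := if v ≠ some x then (some x, (0 : Int)) else (v, c)
    (if st.2 < n then [x] else []) ++ pvAGo xs st.1 (st.2 + 1) n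

def filterDuplicatesInSeq_py (l : List Int) (n : Int) : List Int :=
  pvAGo l none 0 n

-- ===== PORT B =====
-- B's outer while loop: take the maximal run of the head, emit min(run,n) copies, recurse on the rest.
def filterDuplicatesInSeq_py_alt (l : List Int) (n : Int) : List Int :=
  match l with
  | [] => []
  | x :: xs =>
    let run := xs.takeWhile (· == x)
    List.replicate (min ((run.length : Int) + 1) n).toNat x
      ++ filterDuplicatesInSeq_py_alt (xs.dropWhile (· == x)) n
termination_by l.length
decreasing_by
  simp only [List.length_cons]
  exact Nat.lt_succ_of_le (List.length_dropWhile_le _ _)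

-- ===== PRECONDITION & SPEC =====
def Spec_filterDuplicatesInSeq_py (l : List Int) (n : Int) (out : List Int) : Prop := out = filterDuplicatesInSeq_py_alt l n
instance (l : List Int) (n : Int) (out : List Int) : Decidable (Spec_filterDuplicatesInSeq_py l n out) := by unfold Spec_filterDuplicatesInSeq_py; infer_instance

-- ===== CLAIM (what is proved, stated in full; the proofs are below) =====
def Claim_equal_filterDuplicatesInSeq_py : Prop := ∀ (l : List Int) (n : Int), Dom_filterDuplicatesInSeq_py l n → Spec_filterDuplicatesInSeq_py l n (filterDuplicatesInSeq_py l n)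

-- ===== LEMMAS AND PROOFS =====

-- Along a run of x starting at count c, A emits min(c+L,n)-min(c,n) copies of x, then resets on the rest.
theorem pvAGo_run (n x : Int) : ∀ (xs : List Int) (c : Int),
    pvAGo xs (some x) c n =
      List.replicate (min (c + ((xs.takeWhile (· == x)).length : Int)) n - min c n).toNat x
        ++ pvAGo (xs.dropWhile (· == x)) none 0 n := by
  intro xs
  induction xs with
  | nil => intro c; simp [pvAGo]
  | cons y ys ih =>
    intro c
    by_cases hxy : y = x
    · subst hxy
      simp only [List.takeWhile_cons, List.dropWhile_cons, beq_self_eq_true, if_true,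
        List.length_cons, Nat.cast_add, Nat.cast_one]
      have h1 : pvAGo (y :: ys) (some y) c n =
          (if c < n then [y] else []) ++ pvAGo ys (some y) (c + 1) n := by
        simp [pvAGo]
      rw [h1, ih (c + 1)]
      by_cases hcn : c < n
      · have hmin : min c n = c := by omega
        have hmin1 : min (c + 1) n = c + 1 := by omega
        have hge : c + 1 ≤ min (c + 1 + ((ys.takeWhile (· == y)).length : Int)) n := by
          have : (0:Int) ≤ ((ys.takeWhile (· == y)).length : Int) := by positivity
          omega
        rw [if_pos hcn, hmin, hmin1]
        have hcount : (min (c + (((ys.takeWhile (· == y)).length : Int) + 1)) n - c).toNat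
            = (min (c + 1 + ((ys.takeWhile (· == y)).length : Int)) n - (c + 1)).toNat + 1 := by
          have h2 : c + (((ys.takeWhile (· == y)).length : Int) + 1)
              = c + 1 + ((ys.takeWhile (· == y)).length : Int) := by ring
          rw [h2]; omega
        rw [hcount, List.replicate_succ]
        simp
      · have hn : min c n = n := by omega
        have hn1 : min (c + 1) n = n := by omega
        have hnL : min (c + (((ys.takeWhile (· == y)).length : Int) + 1)) n = n := by
          have : (0:Int) ≤ ((ys.takeWhile (· == y)).length : Int) := by positivity
          omega
        have hnL' : min (c + 1 + ((ys.takeWhile (· == y)).length : Int)) n = n := by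
          have : (0:Int) ≤ ((ys.takeWhile (· == y)).length : Int) := by positivity
          omega
        rw [if_neg hcn]
        simp [hn, hn1, hnL, hnL']
    · have hb : (y == x) = false := by simp [hxy]
      simp only [List.takeWhile_cons, List.dropWhile_cons, hb, if_neg Bool.false_ne_true,
        List.length_nil]
      have : min (c + ((0:Nat) : Int)) n - min c n = 0 := by simp
      rw [this]
      simp only [Int.toNat_zero, List.replicate_zero, List.nil_append]
      -- both states reset on y (some x ≠ some y and none ≠ some y)
      show pvAGo (y :: ys) (some x) c n = pvAGo (y :: ys) none 0 n
      simp [pvAGo, Ne.symm hxy]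

theorem pvA_eq_alt : ∀ (l : List Int) (n : Int),
    filterDuplicatesInSeq_py l n = filterDuplicatesInSeq_py_alt l n := by
  intro l n
  induction l using filterDuplicatesInSeq_py_alt.induct with
  | case1 => simp [filterDuplicatesInSeq_py, filterDuplicatesInSeq_py_alt, pvAGo]
  | case2 x xs ih =>
    show pvAGo (x :: xs) none 0 n = filterDuplicatesInSeq_py_alt (x :: xs) n
    have h1 : pvAGo (x :: xs) none 0 n =
        (if (0:Int) < n then [x] else []) ++ pvAGo xs (some x) 1 n := by
      simp [pvAGo]
    rw [h1, pvAGo_run n x xs 1, filterDuplicatesInSeq_py_alt]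
    rw [show filterDuplicatesInSeq_py (xs.dropWhile (· == x)) n
          = pvAGo (xs.dropWhile (· == x)) none 0 n from rfl] at ih
    rw [ih]
    by_cases hn : (0:Int) < n
    · have h2 : min (1:Int) n = 1 := by omega
      have hge : (1:Int) ≤ min (1 + ((xs.takeWhile (· == x)).length : Int)) n := by
        have : (0:Int) ≤ ((xs.takeWhile (· == x)).length : Int) := by positivity
        omega
      have h3 : (min (((xs.takeWhile (· == x)).length : Int) + 1) n).toNat
          = (min (1 + ((xs.takeWhile (· == x)).length : Int)) n - 1).toNat + 1 := by
        have : ((xs.takeWhile (· == x)).length : Int) + 1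
            = 1 + ((xs.takeWhile (· == x)).length : Int) := by ring
        rw [this]; omega
      rw [if_pos hn, h2, h3, List.replicate_succ]
      simp
    · have h2 : min (1:Int) n = n := by omega
      have h3 : min (1 + ((xs.takeWhile (· == x)).length : Int)) n = n := by
        have : (0:Int) ≤ ((xs.takeWhile (· == x)).length : Int) := by positivity
        omega
      have h4 : min (((xs.takeWhile (· == x)).length : Int) + 1) n = n := by
        have : (0:Int) ≤ ((xs.takeWhile (· == x)).length : Int) := by positivity
        omega
      rw [if_neg hn]
      simp [h2, h3, h4, Int.toNat_of_nonpos (by omega : n ≤ 0)]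

-- ===== VERDICT (by name: the statement is the Claim_ definition above) =====
theorem filterDuplicatesInSeq_py_spec : Claim_equal_filterDuplicatesInSeq_py := by
  intro l n _
  show filterDuplicatesInSeq_py l n = filterDuplicatesInSeq_py_alt l n
  exact pvA_eq_alt l n
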